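-- pv_equiv track=rewrite | github.com/creativeecoding/Daily-Challenges | py/2026-05-02-deepest-brackets.py | get_deepest_brackets
-- ===== SOURCE A (Python) =====
-- def get_deepest_brackets(s):
--     # Find the maximum nesting depth of the brackets
--     max_depth = 0
--     current_depth = 0
--
--     for char in s:
--         if char in "([{":
--             current_depth += 1
--             if current_depth > max_depth:
--                 max_depth = current_depth
--         elif char in ")]}":
--             current_depth -= 1
--
--     # Extract only the characters located at the maximum depth
--     deepest_content = ""
--     current_depth = 0
--
--     for char in s:
--         if char in "([{":
--             current_depth += 1
--         elif char in ")]}":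
--             current_depth -= 1
--         else:
--             if current_depth == max_depth:
--                 deepest_content += char
--
--     return deepest_content
-- ===== SOURCE B (Python) =====
-- def get_deepest_brackets(s):
--     # One pass: reset the collected content whenever a new maximum depth appears.
--     depth = 0
--     max_depth = 0
--     best = []
--     for ch in s:
--         if ch in "([{":
--             depth += 1
--             if depth > max_depth:
--                 max_depth = depth
--                 best = []
--         elif ch in ")]}":
--             depth -= 1
--         elif depth == max_depth:
--             best.append(ch)
--     return "".join(best)
-- ===== Notes on version B (the rewrite author's own statement) =====
-- stated objective: simpler
-- what changed: Replaces A's two scans (first compute max depth, then re-scan to collect characters at that depth) with a single pass that collects characters at the current running maximum and resets the collection whenever a new maximum depth is reached.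
import Mathlib
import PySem

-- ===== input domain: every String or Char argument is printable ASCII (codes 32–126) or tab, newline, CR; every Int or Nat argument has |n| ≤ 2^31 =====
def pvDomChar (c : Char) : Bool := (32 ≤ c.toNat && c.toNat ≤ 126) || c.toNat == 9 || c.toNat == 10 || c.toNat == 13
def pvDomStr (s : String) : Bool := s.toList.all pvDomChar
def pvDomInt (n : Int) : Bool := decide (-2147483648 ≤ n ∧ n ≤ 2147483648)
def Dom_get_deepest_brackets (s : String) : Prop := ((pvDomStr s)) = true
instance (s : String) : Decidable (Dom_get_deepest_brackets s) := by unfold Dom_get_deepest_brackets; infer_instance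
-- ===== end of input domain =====

-- B does the same job in ONE pass (reset collected content on a new maximum depth) instead of A's two scans; objective: simpler.

-- ===== PORT A =====
-- char in "([{" / char in ")]}" for a single char = membership test among these chars
def pvIsOpen (c : Char) : Bool := c == '(' || c == '[' || c == '{'
def pvIsClose (c : Char) : Bool := c == ')' || c == ']' || c == '}'

-- first loop of A: state (max_depth, current_depth)
def stepA1 (st : Int × Int) (c : Char) : Int × Int :=
  if pvIsOpen c then
    let cd := st.2 + 1
    (if cd > st.1 then cd else st.1, cd)
  else if pvIsClose c then (st.1, st.2 - 1)
  else st

-- second loop of A: state (current_depth, deepest_content), target max depth m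
def stepA2 (m : Int) (st : Int × List Char) (c : Char) : Int × List Char :=
  if pvIsOpen c then (st.1 + 1, st.2)
  else if pvIsClose c then (st.1 - 1, st.2)
  else if st.1 = m then (st.1, st.2 ++ [c]) else st

def get_deepest_brackets (s : String) : String :=
  let p := s.toList.foldl stepA1 (0, 0)
  String.mk (s.toList.foldl (stepA2 p.1) (0, [])).2

-- ===== PORT B =====
-- single loop of B: state (depth, max_depth, best)
def stepB (st : Int × Int × List Char) (c : Char) : Int × Int × List Char :=
  if pvIsOpen c then
    let d := st.1 + 1
    if d > st.2.1 then (d, d, []) else (d, st.2.1, st.2.2)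
  else if pvIsClose c then (st.1 - 1, st.2.1, st.2.2)
  else if st.1 = st.2.1 then (st.1, st.2.1, st.2.2 ++ [c]) else st

def get_deepest_brackets_alt (s : String) : String :=
  String.mk (s.toList.foldl stepB (0, 0, [])).2.2

-- ===== PRECONDITION & SPEC =====
def Spec_get_deepest_brackets (s : String) (out : String) : Prop := out = get_deepest_brackets_alt s
instance (s : String) (out : String) : Decidable (Spec_get_deepest_brackets s out) := by unfold Spec_get_deepest_brackets; infer_instance

-- ===== CLAIM (what is proved, stated in full; the proofs are below) =====
def Claim_equal_get_deepest_brackets : Prop := ∀ (s : String), Dom_get_deepest_brackets s → Spec_get_deepest_brackets s (get_deepest_brackets s)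

-- ===== LEMMAS AND PROOFS =====

theorem pv_invariant (l : List Char) :
    0 ≤ (l.foldl stepA1 (0, 0)).1 ∧
    (l.foldl stepA1 (0, 0)).2 ≤ (l.foldl stepA1 (0, 0)).1 ∧
    (∀ t : Int, (l.foldl (stepA2 t) (0, [])).1 = (l.foldl stepA1 (0, 0)).2) ∧
    (∀ t : Int, (l.foldl stepA1 (0, 0)).1 < t → (l.foldl (stepA2 t) (0, [])).2 = []) ∧
    l.foldl stepB (0, 0, []) =
      ((l.foldl stepA1 (0, 0)).2, (l.foldl stepA1 (0, 0)).1,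
        (l.foldl (stepA2 (l.foldl stepA1 (0, 0)).1) (0, [])).2) := by
  induction l using List.reverseRecOn with
  | nil => simp
  | append_singleton l c ih =>
    obtain ⟨hm0, hdm, hdep, hempty, hB⟩ := ih
    rcases hP : l.foldl stepA1 (0, 0) with ⟨m, d⟩
    rw [hP] at hm0 hdm hdep hempty hB
    dsimp only at hm0 hdm hdep hempty hB
    simp only [List.foldl_append, List.foldl_cons, List.foldl_nil, hP]
    by_cases ho : pvIsOpen c = true
    · by_cases hgt : d + 1 > m
      · have hA : stepA1 (m, d) c = (d + 1, d + 1) := by simp [stepA1, ho, hgt]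
        refine ⟨?_, ?_, ?_, ?_, ?_⟩
        · rw [hA]; dsimp only; omega
        · rw [hA]
        · intro t; simp [stepA2, ho, hdep t, hA]
        · intro t ht; rw [hA] at ht; dsimp only at ht
          simp [stepA2, ho, hempty t (by omega)]
        · rw [hB, hA]
          simp [stepB, stepA2, ho, hgt, hempty (d + 1) (by omega)]
      · have hA : stepA1 (m, d) c = (m, d + 1) := by simp [stepA1, ho, hgt]
        refine ⟨?_, ?_, ?_, ?_, ?_⟩
        · rw [hA]; dsimp only; omega
        · rw [hA]; dsimp only; omega
        · intro t; simp [stepA2, ho, hdep t, hA]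
        · intro t ht; rw [hA] at ht; dsimp only at ht
          simp [stepA2, ho, hempty t ht]
        · rw [hB, hA]
          simp [stepB, stepA2, ho, hgt]
    · by_cases hc : pvIsClose c = true
      · have hA : stepA1 (m, d) c = (m, d - 1) := by simp [stepA1, ho, hc]
        refine ⟨?_, ?_, ?_, ?_, ?_⟩
        · rw [hA]; dsimp only; omega
        · rw [hA]; dsimp only; omega
        · intro t; simp [stepA2, ho, hc, hdep t, hA]
        · intro t ht; rw [hA] at ht; dsimp only at ht
          simp [stepA2, ho, hc, hempty t ht]
        · rw [hB, hA]
          simp [stepB, stepA2, ho, hc]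
      · have hA : stepA1 (m, d) c = (m, d) := by simp [stepA1, ho, hc]
        refine ⟨?_, ?_, ?_, ?_, ?_⟩
        · rw [hA]; dsimp only; omega
        · rw [hA]; dsimp only; omega
        · intro t
          simp only [stepA2, ho, hc, if_false, Bool.false_eq_true, hA]
          split_ifs <;> simp [hdep t]
        · intro t ht; rw [hA] at ht; dsimp only at ht
          have hne : (l.foldl (stepA2 t) (0, [])).1 ≠ t := by rw [hdep t]; omega
          simp [stepA2, ho, hc, hne, hempty t ht]
        · rw [hB, hA]
          by_cases he : d = m
          · simp [stepB, stepA2, ho, hc, he, hdep (m : Int)]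
          · have hne2 : (l.foldl (stepA2 m) (0, [])).1 ≠ m := by rw [hdep m]; exact he
            simp [stepB, stepA2, ho, hc, he, hne2]

-- ===== VERDICT (by name: the statement is the Claim_ definition above) =====
theorem get_deepest_brackets_spec : Claim_equal_get_deepest_brackets := by
  intro s _
  unfold Spec_get_deepest_brackets get_deepest_brackets get_deepest_brackets_alt
  rw [(pv_invariant s.toList).2.2.2.2]
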